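-- pv_equiv track=rewrite | github.com/Vamsi-klu/Vamsi-klu | .github/scripts/update_contributions.py | summarize_contributions
-- ===== SOURCE A (Python) =====
-- def summarize_contributions(pr_list):
--     titles = [pr["title"] for pr in pr_list]
--     # Create a brief summary from PR titles
--     keywords = set()
--     for title in titles:
--         lower = title.lower()
--         if "fix" in lower or "bug" in lower:
--             keywords.add("Bug fixes")
--         if "doc" in lower:
--             keywords.add("Documentation")
--         if "feat" in lower or "add" in lower:
--             keywords.add("New features")
--         if "refactor" in lower or "migrat" in lower:
--             keywords.add("Refactoring")
--         if "test" in lower: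
--             keywords.add("Testing")
--         if "perf" in lower or "optim" in lower:
--             keywords.add("Performance")
--         if "chore" in lower or "improv" in lower:
--             keywords.add("Improvements")
--
--     if not keywords:
--         keywords.add("Contributions")
--
--     return ", ".join(sorted(keywords))
-- ===== SOURCE B (Python) =====
-- RULES = [
--     ("Bug fixes", ("fix", "bug")),
--     ("Documentation", ("doc",)),
--     ("Improvements", ("chore", "improv")),
--     ("New features", ("feat", "add")),
--     ("Performance", ("perf", "optim")),
--     ("Refactoring", ("refactor", "migrat")),
--     ("Testing", ("test",)),
-- ]
--
-- def summarize_contributions(pr_list):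
--     # Category-major scan over a fixed rule table; the table is already in
--     # alphabetical order, so no set and no sort are needed.
--     titles = [pr["title"].lower() for pr in pr_list]
--     cats = [cat for cat, pats in RULES
--             if any(p in t for t in titles for p in pats)]
--     return ", ".join(cats) if cats else "Contributions"
-- ===== Notes on version B (the rewrite author's own statement) =====
-- stated objective: idiomatic
-- what changed: Replaces the title-major loop that accumulates a set and sorts it with a category-major scan of a fixed, alphabetically ordered rule table, so the matching categories come out already sorted with no set and no sort.
import Mathlib
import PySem

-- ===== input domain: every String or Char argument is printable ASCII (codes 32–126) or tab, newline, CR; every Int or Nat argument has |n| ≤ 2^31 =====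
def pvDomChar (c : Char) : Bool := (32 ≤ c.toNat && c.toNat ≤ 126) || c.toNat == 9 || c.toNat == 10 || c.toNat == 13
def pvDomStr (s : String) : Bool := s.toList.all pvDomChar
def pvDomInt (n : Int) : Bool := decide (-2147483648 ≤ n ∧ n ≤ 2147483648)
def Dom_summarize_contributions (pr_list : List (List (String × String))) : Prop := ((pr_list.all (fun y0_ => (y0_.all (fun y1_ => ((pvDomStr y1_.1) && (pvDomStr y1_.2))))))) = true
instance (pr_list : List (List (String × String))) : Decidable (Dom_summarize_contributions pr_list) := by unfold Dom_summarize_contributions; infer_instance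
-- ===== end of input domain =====

-- B replaces A's title-major set-and-sort pass with a category-major scan of a fixed
-- alphabetically ordered rule table (idiomatic decomposition; same asymptotic cost).


-- ===== PORT A =====
-- one iteration of A's 'for title in titles' loop body (the seven if-branches, in order)
def pvAddCats (kw : PySem.Set String) (title : String) : PySem.Set String :=
  let lower := PySem.Str.lower title
  let kw := if PySem.Str.isIn "fix" lower || PySem.Str.isIn "bug" lower then PySem.Set.add kw "Bug fixes" else kw
  let kw := if PySem.Str.isIn "doc" lower then PySem.Set.add kw "Documentation" else kw
  let kw := if PySem.Str.isIn "feat" lower || PySem.Str.isIn "add" lower then PySem.Set.add kw "New features" else kw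
  let kw := if PySem.Str.isIn "refactor" lower || PySem.Str.isIn "migrat" lower then PySem.Set.add kw "Refactoring" else kw
  let kw := if PySem.Str.isIn "test" lower then PySem.Set.add kw "Testing" else kw
  let kw := if PySem.Str.isIn "perf" lower || PySem.Str.isIn "optim" lower then PySem.Set.add kw "Performance" else kw
  let kw := if PySem.Str.isIn "chore" lower || PySem.Str.isIn "improv" lower then PySem.Set.add kw "Improvements" else kw
  kw

def summarize_contributions (pr_list : List (List (String × String))) : String :=
  -- pr["title"]: total via getD "" under Pre_ (Python raises KeyError when the key is absent)
  let titles := pr_list.map (fun pr => ((PySem.Dict.mk pr).get? "title").getD "")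
  let keywords := titles.foldl pvAddCats PySem.Set.empty
  let keywords := if keywords.isEmpty then PySem.Set.add keywords "Contributions" else keywords
  PySem.Str.join ", " (PySem.List.sorted keywords (fun x => x) false)

-- ===== PORT B =====
def pvRules : List (String × List String) :=
  [("Bug fixes", ["fix", "bug"]),
   ("Documentation", ["doc"]),
   ("Improvements", ["chore", "improv"]),
   ("New features", ["feat", "add"]),
   ("Performance", ["perf", "optim"]),
   ("Refactoring", ["refactor", "migrat"]),
   ("Testing", ["test"])]

def summarize_contributions_alt (pr_list : List (List (String × String))) : String :=
  let titles := pr_list.map (fun pr => PySem.Str.lower (((PySem.Dict.mk pr).get? "title").getD ""))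
  let cats := (pvRules.filter (fun r => titles.any (fun t => r.2.any (fun p => PySem.Str.isIn p t)))).map (·.1)
  if cats.isEmpty then "Contributions" else PySem.Str.join ", " cats

-- ===== PRECONDITION & SPEC =====
-- Pre_ excludes exactly the inputs where Python A raises KeyError: a PR dict without a "title" key.
def Pre_summarize_contributions (pr_list : List (List (String × String))) : Prop :=
  ∀ pr ∈ pr_list, ((PySem.Dict.mk pr).get? "title").isSome = true
instance (pr_list : List (List (String × String))) : Decidable (Pre_summarize_contributions pr_list) := by unfold Pre_summarize_contributions; infer_instance

def pvWitness_summarize_contributions : (List (List (String × String))) :=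
  [[("title", "Fix typo in docs")], [("title", "Add tests")]]

def Spec_summarize_contributions (pr_list : List (List (String × String))) (out : String) : Prop := out = summarize_contributions_alt pr_list
instance (pr_list : List (List (String × String))) (out : String) : Decidable (Spec_summarize_contributions pr_list out) := by unfold Spec_summarize_contributions; infer_instance

-- ===== CLAIM (what is proved, stated in full; the proofs are below) =====
def Claim_equal_summarize_contributions : Prop := ∀ (pr_list : List (List (String × String))), Dom_summarize_contributions pr_list → Pre_summarize_contributions pr_list → Spec_summarize_contributions pr_list (summarize_contributions pr_list)

-- ===== LEMMAS AND PROOFS =====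

-- does any of the patterns ps occur in the lowering of any of the titles?
def pvHit (titles : List String) (ps : List String) : Bool :=
  titles.any (fun t => ps.any (fun p => PySem.Str.isIn p (PySem.Str.lower t)))

theorem pvMem_ite_add {c : Prop} [Decidable c] (kw : PySem.Set String) (s x : String) :
    (x ∈ (if c then PySem.Set.add kw s else kw)) ↔ (x ∈ kw ∨ (c ∧ x = s)) := by
  split_ifs with h
  · simp [PySem.Set.mem_add, h]
  · simp [h]

theorem pvMem_addCats (kw : PySem.Set String) (t x : String) :
    x ∈ pvAddCats kw t ↔ x ∈ kw ∨ ∃ r ∈ pvRules, x = r.1 ∧ pvHit [t] r.2 = true := by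
  unfold pvAddCats
  simp only [pvMem_ite_add, pvRules, pvHit, List.any_cons, List.any_nil,
    Bool.or_false, List.exists_mem_cons_iff, List.not_mem_nil, false_and, exists_false,
    or_false, Bool.or_eq_true]
  constructor
  · rintro (((((((h | ⟨hc, hx⟩) | ⟨hc, hx⟩) | ⟨hc, hx⟩) | ⟨hc, hx⟩) | ⟨hc, hx⟩) | ⟨hc, hx⟩) | ⟨hc, hx⟩)
    · exact Or.inl h
    · exact Or.inr (Or.inl ⟨hx, hc⟩)
    · exact Or.inr (Or.inr (Or.inl ⟨hx, hc⟩))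
    · exact Or.inr (Or.inr (Or.inr (Or.inr (Or.inl ⟨hx, hc⟩))))
    · exact Or.inr (Or.inr (Or.inr (Or.inr (Or.inr (Or.inr (Or.inl ⟨hx, hc⟩))))))
    · exact Or.inr (Or.inr (Or.inr (Or.inr (Or.inr (Or.inr (Or.inr ⟨hx, hc⟩))))))
    · exact Or.inr (Or.inr (Or.inr (Or.inr (Or.inr (Or.inl ⟨hx, hc⟩)))))
    · exact Or.inr (Or.inr (Or.inr (Or.inl ⟨hx, hc⟩)))
  · rintro (h | ⟨hx, hc⟩ | ⟨hx, hc⟩ | ⟨hx, hc⟩ | ⟨hx, hc⟩ | ⟨hx, hc⟩ | ⟨hx, hc⟩ | ⟨hx, hc⟩)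
    · exact Or.inl (Or.inl (Or.inl (Or.inl (Or.inl (Or.inl (Or.inl h))))))
    · exact Or.inl (Or.inl (Or.inl (Or.inl (Or.inl (Or.inl (Or.inr ⟨hc, hx⟩))))))
    · exact Or.inl (Or.inl (Or.inl (Or.inl (Or.inl (Or.inr ⟨hc, hx⟩)))))
    · exact Or.inr ⟨hc, hx⟩
    · exact Or.inl (Or.inl (Or.inl (Or.inl (Or.inr ⟨hc, hx⟩))))
    · exact Or.inl (Or.inr ⟨hc, hx⟩)
    · exact Or.inl (Or.inl (Or.inl (Or.inr ⟨hc, hx⟩)))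
    · exact Or.inl (Or.inl (Or.inr ⟨hc, hx⟩))

theorem pvNodup_ite_add {c : Prop} [Decidable c] (kw : PySem.Set String) (s : String)
    (h : kw.Nodup) : (if c then PySem.Set.add kw s else kw).Nodup := by
  split_ifs
  · exact PySem.Set.nodup_add _ _ h
  · exact h

theorem pvNodup_addCats (kw : PySem.Set String) (t : String) (h : kw.Nodup) :
    (pvAddCats kw t).Nodup := by
  unfold pvAddCats
  exact pvNodup_ite_add _ _ (pvNodup_ite_add _ _ (pvNodup_ite_add _ _ (pvNodup_ite_add _ _
    (pvNodup_ite_add _ _ (pvNodup_ite_add _ _ (pvNodup_ite_add _ _ h))))))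

theorem pvNodup_foldl (titles : List String) (kw : PySem.Set String) (h : kw.Nodup) :
    (titles.foldl pvAddCats kw).Nodup := by
  induction titles generalizing kw with
  | nil => exact h
  | cons t ts ih => exact ih _ (pvNodup_addCats kw t h)

theorem pvHit_cons (t : String) (ts ps : List String) :
    pvHit (t :: ts) ps = (pvHit [t] ps || pvHit ts ps) := by
  simp only [pvHit, List.any_cons, List.any_nil, Bool.or_false]

theorem pvMem_foldl (titles : List String) (kw : PySem.Set String) (x : String) :
    x ∈ titles.foldl pvAddCats kw ↔
      x ∈ kw ∨ ∃ r ∈ pvRules, x = r.1 ∧ pvHit titles r.2 = true := by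
  induction titles generalizing kw with
  | nil => simp [pvHit]
  | cons t ts ih =>
    rw [List.foldl_cons, ih]
    constructor
    · rintro (h | ⟨r, hr, hx, hh⟩)
      · rcases (pvMem_addCats kw t x).mp h with h' | ⟨r, hr, hx, hh⟩
        · exact Or.inl h'
        · exact Or.inr ⟨r, hr, hx, by rw [pvHit_cons, Bool.or_eq_true]; exact Or.inl hh⟩
      · exact Or.inr ⟨r, hr, hx, by rw [pvHit_cons, Bool.or_eq_true]; exact Or.inr hh⟩
    · rintro (h | ⟨r, hr, hx, hh⟩)
      · exact Or.inl ((pvMem_addCats kw t x).mpr (Or.inl h))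
      · rw [pvHit_cons, Bool.or_eq_true] at hh
        rcases hh with h1 | h2
        · exact Or.inl ((pvMem_addCats kw t x).mpr (Or.inr ⟨r, hr, hx, h1⟩))
        · exact Or.inr ⟨r, hr, hx, h2⟩

theorem pvNames_pairwise : (pvRules.map (·.1)).Pairwise (· < ·) := by
  have h : (pvRules.map (·.1)).Pairwise (fun a b : String => a.toList < b.toList) := by decide
  exact h.imp (fun hab => String.lt_iff_toList_lt.mpr hab)

theorem pvNames_nodup : (pvRules.map (·.1)).Nodup := by decide

-- ===== VERDICT (by name: the statement is the Claim_ definition above) =====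
theorem summarize_contributions_spec : Claim_equal_summarize_contributions := by
  intro pr_list _ _
  unfold Spec_summarize_contributions
  simp only [summarize_contributions, summarize_contributions_alt]
  set titles : List String := pr_list.map (fun pr => ((PySem.Dict.mk pr).get? "title").getD "") with htitles
  have hlow : pr_list.map (fun pr => PySem.Str.lower (((PySem.Dict.mk pr).get? "title").getD ""))
      = titles.map PySem.Str.lower := by
    simp [htitles, List.map_map, Function.comp]
  rw [hlow]
  set K : PySem.Set String := titles.foldl pvAddCats PySem.Set.empty with hK
  have hKmem : ∀ x, x ∈ K ↔ ∃ r ∈ pvRules, x = r.1 ∧ pvHit titles r.2 = true := by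
    intro x
    rw [hK, pvMem_foldl]
    simp [PySem.Set.empty]
  have hKnodup : K.Nodup := pvNodup_foldl _ _ (by simp [PySem.Set.empty])
  have hfiltB : ∀ r : String × List String,
      (titles.map PySem.Str.lower).any (fun t => r.2.any (fun p => PySem.Str.isIn p t))
        = pvHit titles r.2 := by
    intro r; simp only [pvHit, List.any_map]; rfl
  set cats : List String :=
    (pvRules.filter (fun r => (titles.map PySem.Str.lower).any
        (fun t => r.2.any (fun p => PySem.Str.isIn p t)))).map (·.1) with hcats
  have hcatsmem : ∀ x, x ∈ cats ↔ ∃ r ∈ pvRules, x = r.1 ∧ pvHit titles r.2 = true := by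
    intro x
    simp only [hcats, List.mem_map, List.mem_filter, hfiltB]
    constructor
    · rintro ⟨r, ⟨hr, hh⟩, rfl⟩; exact ⟨r, hr, rfl, hh⟩
    · rintro ⟨r, hr, rfl, hh⟩; exact ⟨r, ⟨hr, hh⟩, rfl⟩
  have hsub : cats.Sublist (pvRules.map (·.1)) := by
    rw [hcats]
    exact List.Sublist.map _ List.filter_sublist
  have hcatsnodup : cats.Nodup := pvNames_nodup.sublist hsub
  have hcatspw : cats.Pairwise (· < ·) := pvNames_pairwise.sublist hsub
  by_cases hempty : cats = []
  · -- no category matched: both sides return "Contributions"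
    have hKnil : K = [] := by
      rcases hKn : K with _ | ⟨y, K'⟩
      · rfl
      · exfalso
        have hyK : y ∈ K := by rw [hKn]; exact List.mem_cons_self
        have : y ∈ cats := (hcatsmem y).mpr ((hKmem y).mp hyK)
        simp [hempty] at this
    rw [hKnil, hempty]
    rfl
  · -- some category matched: A's sorted set IS B's table-ordered list
    have hperm : cats.Perm K := by
      rw [List.perm_ext_iff_of_nodup hcatsnodup hKnodup]
      intro x; rw [hcatsmem, hKmem]
    have hKneNil : K ≠ [] := by
      obtain ⟨x, hx⟩ := List.exists_mem_of_ne_nil cats hempty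
      have hxK : x ∈ K := (hKmem x).mpr ((hcatsmem x).mp hx)
      intro h; rw [h] at hxK; simp at hxK
    rw [if_neg (by simpa [List.isEmpty_iff] using hKneNil),
        if_neg (by simpa [List.isEmpty_iff] using hempty)]
    rw [PySem.List.sorted_eq_of_perm_of_pairwise_lt K cats (fun x => x) hperm hcatspw]
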